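-- pv_equiv track=rewrite | github.com/0202alcc/luvatrix | examples/full_suite_interactive/app_main.py | select_sensors
-- ===== SOURCE A (Python) =====
-- def select_sensors(requested: list[str], available_sensors: list[str]) -> list[str]:
--     if not requested:
--         return list(available_sensors)
--     selected = []
--     for sensor in requested:
--         if sensor not in available_sensors:
--             raise ValueError(
--                 f"unsupported sensor `{sensor}` on this runtime; choose from: {', '.join(available_sensors)}"
--             )
--         if sensor not in selected:
--             selected.append(sensor)
--     return selected
-- ===== SOURCE B (Python) =====
-- def select_sensors(requested: list[str], available_sensors: list[str]) -> list[str]: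
--     if not requested:
--         return list(available_sensors)
--     unsupported = set(requested) - set(available_sensors)
--     if unsupported:
--         culprit = next(s for s in requested if s in unsupported)
--         raise ValueError(
--             f"unsupported sensor `{culprit}` on this runtime; choose from: {', '.join(available_sensors)}"
--         )
--     # dedup without a seen-accumulator: keep exactly the first occurrence of each sensor
--     return [s for i, s in enumerate(requested) if requested.index(s) == i]
-- ===== Notes on version B (the rewrite author's own statement) =====
-- stated objective: alternative
-- what changed: Replaces A's single forward loop interleaving availability checks with a seen-list accumulator by set-difference validation (set(requested) - set(available_sensors), raising the identical ValueError for the first offender) plus an accumulator-free dedup that keeps an element iff its index equals its first-occurrence index.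
import Mathlib
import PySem

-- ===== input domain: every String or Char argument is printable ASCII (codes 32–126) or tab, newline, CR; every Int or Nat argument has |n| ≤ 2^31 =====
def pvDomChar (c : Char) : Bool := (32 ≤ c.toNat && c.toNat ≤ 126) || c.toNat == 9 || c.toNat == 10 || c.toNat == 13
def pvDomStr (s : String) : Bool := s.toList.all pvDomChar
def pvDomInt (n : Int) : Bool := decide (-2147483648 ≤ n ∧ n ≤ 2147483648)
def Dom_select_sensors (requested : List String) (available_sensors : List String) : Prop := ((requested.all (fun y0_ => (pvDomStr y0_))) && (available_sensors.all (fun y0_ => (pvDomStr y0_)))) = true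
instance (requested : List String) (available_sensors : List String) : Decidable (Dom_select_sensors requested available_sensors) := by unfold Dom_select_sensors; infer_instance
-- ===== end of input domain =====

-- B replaces A's single validate-and-accumulate loop by set-difference validation plus an
-- accumulator-free first-occurrence-index dedup (objective: alternative); return values agree wherever A returns.


-- ===== PORT A =====
-- A's loop: membership check (raise = none), then append-if-new accumulator.
def selectLoopA (available : List String) (sel : List String) : List String → Option (List String)
  | [] => some sel
  | s :: rest =>
      if available.contains s then
        selectLoopA available (if sel.contains s then sel else sel ++ [s]) rest
      else none  -- raise ValueError

def select_sensors (requested : List String) (available_sensors : List String) : List String :=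
  if requested = [] then available_sensors
  else (selectLoopA available_sensors [] requested).getD []

-- ===== PORT B =====
-- set(requested) - set(available_sensors); raise (= []) if nonempty;
-- else the comprehension [s for i, s in enumerate(requested) if requested.index(s) == i]
def select_sensors_alt (requested : List String) (available_sensors : List String) : List String :=
  if requested = [] then available_sensors
  else
    let unsupported := PySem.Set.diff (PySem.Set.ofList requested) (PySem.Set.ofList available_sensors)
    if unsupported.isEmpty then
      ((PySem.List.enumerate requested 0).filter
        (fun p => match PySem.List.index? requested p.2 with
          | some k => (k : Int) == p.1
          | none => false)).map (·.2)
    else []  -- raise ValueError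

-- ===== PRECONDITION & SPEC =====
-- Pre_ excludes exactly the inputs on which A raises ValueError: some requested sensor not available.
def Pre_select_sensors (requested : List String) (available_sensors : List String) : Prop :=
  ∀ s ∈ requested, s ∈ available_sensors
instance (requested : List String) (available_sensors : List String) : Decidable (Pre_select_sensors requested available_sensors) := by unfold Pre_select_sensors; infer_instance

def pvWitness_select_sensors : List String × List String := (["b", "a", "b"], ["a", "b", "c"])

def Spec_select_sensors (requested : List String) (available_sensors : List String) (out : List String) : Prop := out = select_sensors_alt requested available_sensors
instance (requested : List String) (available_sensors : List String) (out : List String) : Decidable (Spec_select_sensors requested available_sensors out) := by unfold Spec_select_sensors; infer_instance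

-- ===== CLAIM (what is proved, stated in full; the proofs are below) =====
def Claim_equal_select_sensors : Prop := ∀ (requested : List String) (available_sensors : List String), Dom_select_sensors requested available_sensors → Pre_select_sensors requested available_sensors → Spec_select_sensors requested available_sensors (select_sensors requested available_sensors)

-- ===== LEMMAS AND PROOFS =====
theorem selectLoopA_eq_fold (available : List String) (r : List String) (sel : List String)
    (h : ∀ s ∈ r, s ∈ available) :
    selectLoopA available sel r = some (r.foldl PySem.Set.add sel) := by
  induction r generalizing sel with
  | nil => rfl
  | cons s rest ih =>
      have hs : available.contains s := by
        simp; exact h s (List.mem_cons_self)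
      simp only [selectLoopA, hs, if_pos, List.foldl_cons]
      rw [ih _ (fun t ht => h t (List.mem_cons_of_mem _ ht))]
      rfl

-- the first-occurrence comprehension equals set(xs)'s first-insertion order
theorem firstIdx_eq_ofList (xs : List String) :
    ((PySem.List.enumerate xs 0).filter
        (fun p => match PySem.List.index? xs p.2 with
          | some k => (k : Int) == p.1
          | none => false)).map (·.2)
      = PySem.Set.ofList xs := by
  induction xs using List.reverseRecOn with
  | nil => rfl
  | append_singleton init a ih =>
      rw [PySem.List.enumerate_append, List.filter_append, List.map_append,
          PySem.Set.ofList_append_singleton, PySem.Set.add_eq_ite]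
      have hcongr : ∀ p ∈ PySem.List.enumerate init 0,
          ((match PySem.List.index? (init ++ [a]) p.2 with
            | some k => (k : Int) == p.1
            | none => false) : Bool)
          = ((match PySem.List.index? init p.2 with
            | some k => (k : Int) == p.1
            | none => false) : Bool) := by
        intro p hp
        obtain ⟨k, hk, rfl⟩ := (PySem.List.mem_enumerate_iff init 0 p).mp hp
        rw [PySem.List.index?_append_of_mem _ (List.getElem_mem hk)]
      rw [List.filter_congr hcongr, ih]
      have hsing : PySem.List.enumerate [a] ((0 : Int) + (init.length : Int))
          = [(((0 : Int) + (init.length : Int)), a)] := by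
        simp [PySem.List.enumerate_cons, PySem.List.enumerate_nil]
      rw [hsing]
      by_cases hm : a ∈ init
      · have hmem : a ∈ PySem.Set.ofList init := (PySem.Set.mem_ofList init a).mpr hm
        cases hidx : PySem.List.index? init a with
        | none =>
            exact absurd hm ((PySem.List.index?_eq_none_iff init a).mp hidx)
        | some k =>
            obtain ⟨hklt, -, -⟩ := PySem.List.getElem_of_index?_eq_some hidx
            have hpred : (match List.idxOf? a (init ++ [a]) with
                | some k => (k : Int) == (init.length : Int)
                | none => false) = false := by
              rw [← PySem.List.index?_eq_idxOf?, PySem.List.index?_append_of_mem _ hm, hidx]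
              simp
              omega
            simp [hpred, hmem]
      · have hmem : a ∉ PySem.Set.ofList init := fun hx => hm ((PySem.Set.mem_ofList init a).mp hx)
        have hpred : (match List.idxOf? a (init ++ [a]) with
            | some k => (k : Int) == (init.length : Int)
            | none => false) = true := by
          rw [← PySem.List.index?_eq_idxOf?, PySem.List.index?_append_singleton_self init a hm]
          simp
        simp [hpred, hmem]

-- ===== VERDICT (by name: the statement is the Claim_ definition above) =====
theorem select_sensors_spec : Claim_equal_select_sensors := by
  intro req av _ hpre
  unfold Spec_select_sensors select_sensors select_sensors_alt
  by_cases hnil : req = []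
  · simp [hnil]
  · have hdiff : PySem.Set.diff (PySem.Set.ofList req) (PySem.Set.ofList av) = [] := by
      rw [List.eq_nil_iff_forall_not_mem]
      intro x hx
      have h2 := (PySem.Set.mem_diff _ _ x).mp hx
      exact h2.2 ((PySem.Set.mem_ofList av x).mpr
        (hpre x ((PySem.Set.mem_ofList req x).mp h2.1)))
    rw [if_neg hnil, if_neg hnil, selectLoopA_eq_fold av req [] hpre, Option.getD_some]
    simp only [hdiff, List.isEmpty_nil, if_true, firstIdx_eq_ofList]
    rfl
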